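-- pv_equiv track=rewrite | github.com/Korred/daily_code | reddit-dailyprogramming/[2020-03-09] #383 Necklace matching/solution.py | repeats
-- ===== SOURCE A (Python) =====
-- def repeats(n):
--     cnt = 1
--     n = list(n)
--
--     # necklace copy
--     nc = n[:]
--
--     for i in range(len(nc) - 1):
--         nc.append(nc.pop(0))
--         if nc == n:
--             cnt += 1
--
--     return cnt
-- ===== SOURCE B (Python) =====
-- def repeats(n):
--     # smallest rotation period via doubled-string search; count = len // period
--     if not n:
--         return 1
--     return len(n) // (n + n).find(n, 1)
-- ===== Notes on version B (the rewrite author's own statement) =====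
-- stated objective: faster
-- what changed: Instead of generating all n-1 rotations and comparing each to the original, B finds the smallest rotation period as the first occurrence of n in (n+n) starting at index 1 and returns len(n) // period.
import Mathlib
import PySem

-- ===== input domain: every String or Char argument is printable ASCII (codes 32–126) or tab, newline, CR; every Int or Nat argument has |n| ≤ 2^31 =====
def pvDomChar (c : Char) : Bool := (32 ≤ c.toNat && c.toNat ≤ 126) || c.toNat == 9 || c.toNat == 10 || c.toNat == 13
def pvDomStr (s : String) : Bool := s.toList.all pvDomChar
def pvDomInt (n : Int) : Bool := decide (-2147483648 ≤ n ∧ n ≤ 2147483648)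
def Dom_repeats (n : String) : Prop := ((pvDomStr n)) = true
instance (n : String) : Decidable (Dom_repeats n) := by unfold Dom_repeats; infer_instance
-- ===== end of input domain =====

-- B replaces A's rotate-and-compare loop by the smallest rotation period found in the
-- doubled string ((n+n).find(n,1)); answer = len(n) // period (objective: faster).

-- ===== PORT A =====
-- one iteration of A's loop body: nc.append(nc.pop(0)); if nc == n: cnt += 1
def repeatsStep (orig : List Char) (st : Int × List Char) : Int × List Char :=
  match PySem.List.pop? st.2 0 with
  | some (v, rest) =>
      let nc' := rest ++ [v]
      (if nc' = orig then st.1 + 1 else st.1, nc')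
  | none => st

def repeats (n : String) : Int :=
  let nl := n.toList
  ((PySem.List.pyRange 0 ((nl.length : Int) - 1) 1).foldl
      (fun st _ => repeatsStep nl st) (1, nl)).1

-- ===== PORT B =====
def repeats_alt (n : String) : Int :=
  if n = "" then 1
  else PySem.Int.floordiv (PySem.Str.len n) (PySem.Str.findFrom (n ++ n) n 1 none)

-- ===== PRECONDITION & SPEC =====
def Spec_repeats (n : String) (out : Int) : Prop := out = repeats_alt n
instance (n : String) (out : Int) : Decidable (Spec_repeats n out) := by unfold Spec_repeats; infer_instance

-- ===== CLAIM (what is proved, stated in full; the proofs are below) =====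
def Claim_equal_repeats : Prop := ∀ (n : String), Dom_repeats n → Spec_repeats n (repeats n)

-- ===== LEMMAS AND PROOFS =====

theorem foldl_ignore {α β : Type} (f : α → α) (xs : List β) (i : α) :
    xs.foldl (fun a _ => f a) i = f^[xs.length] i := by
  induction xs generalizing i with
  | nil => rfl
  | cons x xs ih => simp [List.foldl_cons, ih, Function.iterate_succ_apply]

theorem repeatsStep_rotate (l : List Char) (hl : l ≠ []) (c : Int) (m : Nat) :
    repeatsStep l (c, l.rotate m)
      = (if l.rotate (m + 1) = l then c + 1 else c, l.rotate (m + 1)) := by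
  obtain ⟨a, t, ha⟩ : ∃ a t, l.rotate m = a :: t := by
    cases h : l.rotate m with
    | nil => exact absurd ((List.rotate_eq_nil_iff).mp h) hl
    | cons a t => exact ⟨a, t, rfl⟩
  have h1 : l.rotate (m + 1) = t ++ [a] := by
    rw [← List.rotate_rotate, ha]
    simpa using List.rotate_cons_succ t a 0
  rw [h1]
  simp [repeatsStep, ha, PySem.List.pop?_zero_cons]

theorem fold_inv (l : List Char) (hl : l ≠ []) (m : Nat) :
    (repeatsStep l)^[m] (1, l)
      = (1 + ((List.range m).countP (fun k => l.rotate (k + 1) = l) : Int), l.rotate m) := by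
  induction m with
  | zero => simp
  | succ m ih =>
    rw [Function.iterate_succ_apply', ih, repeatsStep_rotate l hl _ m,
      List.range_succ, List.countP_append]
    by_cases h : l.rotate (m + 1) = l <;> simp [h] <;> omega

theorem repeats_eq_countP (n : String) (hl : n.toList ≠ []) :
    repeats n = ((List.range n.toList.length).countP
      (fun k => n.toList.rotate k = n.toList) : Int) := by
  have hL : 0 < n.toList.length := List.length_pos_of_ne_nil hl
  have hcast : (((n.toList.length : Int) - 1 - 0).toNat) = n.toList.length - 1 := by omega
  have hcnt : (List.range n.toList.length).countP
      (fun k => n.toList.rotate k = n.toList)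
      = 1 + (List.range (n.toList.length - 1)).countP
          (fun k => n.toList.rotate (k + 1) = n.toList) := by
    conv_lhs => rw [show n.toList.length = (n.toList.length - 1) + 1 from by omega,
      List.range_succ_eq_map]
    rw [List.countP_cons_of_pos (by simp), List.countP_map, Nat.add_comm]
    rfl
  show ((PySem.List.pyRange 0 ((n.toList.length : Int) - 1) 1).foldl
      (fun st _ => repeatsStep n.toList st) (1, n.toList)).1 = _
  rw [PySem.List.pyRange_one, foldl_ignore (repeatsStep n.toList)]
  rw [List.length_map, List.length_range, hcast, fold_inv n.toList hl, hcnt]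
  push_cast
  omega

theorem prefix_drop_iff (l : List Char) (k : Nat) (hk : k ≤ l.length) :
    l <+: (l ++ l).drop k ↔ l.rotate k = l := by
  have hdrop : (l ++ l).drop k = l.drop k ++ l := by
    rw [List.drop_append, show k - l.length = 0 from by omega, List.drop_zero]
  have htake : (l.drop k ++ l).take l.length = l.drop k ++ l.take k := by
    rw [List.take_append,
      List.take_of_length_le (by simp),
      show l.length - (l.drop k).length = k from by simp; omega]
  rw [hdrop, List.prefix_iff_eq_take, htake, List.rotate_eq_drop_append_take hk]
  exact eq_comm

theorem rotate_mul (l : List Char) (P : Nat) (hP : l.rotate P = l) (q : Nat) :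
    l.rotate (P * q) = l := by
  induction q with
  | zero => simp
  | succ q ih => rw [Nat.mul_succ, ← List.rotate_rotate, ih, hP]

theorem rotate_iff_dvd (l : List Char) (P : Nat) (hP1 : 1 ≤ P) (hP : l.rotate P = l)
    (hmin : ∀ i, 1 ≤ i → i < P → l.rotate i ≠ l) (k : Nat) :
    l.rotate k = l ↔ P ∣ k := by
  constructor
  · intro h
    have hk : P * (k / P) + k % P = k := Nat.div_add_mod k P
    rw [← hk, ← List.rotate_rotate, rotate_mul l P hP] at h
    rcases Nat.eq_zero_or_pos (k % P) with h0 | h0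
    · exact Nat.dvd_of_mod_eq_zero h0
    · exact absurd h (hmin _ h0 (Nat.mod_lt _ (by omega)))
  · rintro ⟨q, rfl⟩
    exact rotate_mul l P hP q

theorem countP_range_dvd (p : Nat) (hp : 1 ≤ p) (m : Nat) :
    (List.range (p * m)).countP (fun k => p ∣ k) = m := by
  induction m with
  | zero => simp
  | succ m ih =>
    rw [Nat.mul_succ, List.range_add, List.countP_append, ih, List.countP_map]
    have hr : List.range p = 0 :: (List.range (p - 1)).map Nat.succ := by
      conv_lhs => rw [show p = (p - 1) + 1 from by omega]
      exact List.range_succ_eq_map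
    have hz : ∀ a ∈ List.range (p - 1),
        ¬ (((fun k => decide (p ∣ k)) ∘ (fun x => p * m + x)) ∘ Nat.succ) a = true := by
      intro a ha
      rw [List.mem_range] at ha
      simp only [Function.comp_apply, decide_eq_true_eq]
      intro hd
      have h2 : p ∣ Nat.succ a := (Nat.dvd_add_right (dvd_mul_right p m)).mp hd
      have h3 := Nat.le_of_dvd (Nat.succ_pos a) h2
      omega
    rw [hr, List.countP_cons_of_pos (by simpa using dvd_mul_right p m),
      List.countP_map, List.countP_eq_zero.mpr hz]

theorem toList_ne_nil_of_ne_empty (n : String) (hn : n ≠ "") : n.toList ≠ [] := by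
  intro h
  exact hn (String.toList_eq_nil_iff.mp h)

-- ===== VERDICT (by name: the statement is the Claim_ definition above) =====
theorem repeats_spec : Claim_equal_repeats := by
  intro n _
  unfold Spec_repeats
  by_cases hn : n = ""
  · subst hn
    decide
  · have hl : n.toList ≠ [] := toList_ne_nil_of_ne_empty n hn
    have hL : 0 < n.toList.length := List.length_pos_of_ne_nil hl
    have htl : (n ++ n).toList = n.toList ++ n.toList := by simp
    have hk1 : (1 : Nat) ≤ (n.toList ++ n.toList).length := by
      rw [List.length_append]; omega
    have hinf : n.toList <:+: (n.toList ++ n.toList).drop 1 := by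
      rw [List.drop_append, show 1 - n.toList.length = 0 from by omega,
        List.drop_zero]
      exact (List.suffix_append _ _).isInfix
    have hne : PySem.Chars.findFrom (n.toList ++ n.toList) n.toList ((1 : Nat) : Int) none ≠ -1 := by
      intro hE
      exact ((PySem.Chars.findFrom_natCast_eq_neg_one_iff _ _ 1 hk1).mp hE) hinf
    obtain ⟨hge, hpre, hmin⟩ :=
      PySem.Chars.findFrom_natCast_spec (n.toList ++ n.toList) n.toList 1 hk1 hne
    set F := PySem.Chars.findFrom (n.toList ++ n.toList) n.toList ((1 : Nat) : Int) none with hFdef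
    have hge' : (1 : Int) ≤ F := by exact_mod_cast hge
    set P := F.toNat with hPdef
    have hFP : F = (P : Int) := (Int.toNat_of_nonneg (by omega)).symm
    have hP1 : 1 ≤ P := by
      rw [hFP] at hge'
      exact_mod_cast hge' 
    have hPle : P ≤ n.toList.length := by
      by_contra hc
      rw [not_le] at hc
      have hp : n.toList <+: List.drop n.toList.length (n.toList ++ n.toList) := by
        rw [List.drop_left]
      exact hmin n.toList.length (by omega) hc hp
    have hrotP : n.toList.rotate P = n.toList := (prefix_drop_iff n.toList P hPle).mp hpre
    have hminrot : ∀ i, 1 ≤ i → i < P → n.toList.rotate i ≠ n.toList := by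
      intro i h1 h2 hr
      exact hmin i h1 h2 ((prefix_drop_iff n.toList i (by omega)).mpr hr)
    have hdvdL : P ∣ n.toList.length :=
      (rotate_iff_dvd n.toList P hP1 hrotP hminrot n.toList.length).mp
        (List.rotate_length n.toList)
    have hcnt : (List.range n.toList.length).countP
        (fun k => n.toList.rotate k = n.toList) = n.toList.length / P := by
      have hpred : (List.range n.toList.length).countP
          (fun k => n.toList.rotate k = n.toList)
          = (List.range n.toList.length).countP (fun k => P ∣ k) := by
        apply List.countP_congr
        intro a _
        simp [rotate_iff_dvd n.toList P hP1 hrotP hminrot a]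
      obtain ⟨m, hm⟩ := hdvdL
      rw [hpred, hm, countP_range_dvd P hP1 m, Nat.mul_div_cancel_left m (by omega)]
    have hB : repeats_alt n = ((n.toList.length / P : Nat) : Int) := by
      rw [repeats_alt, if_neg hn]
      have hfind : PySem.Str.findFrom (n ++ n) n 1 none = (P : Int) := by
        rw [show (1 : Int) = ((1 : Nat) : Int) from by norm_num]
        simp only [PySem.Str.findFrom_eq, htl]
        rw [← hFdef, hFP]
      rw [hfind]
      have hlen : PySem.Str.len n = (n.toList.length : Int) := by simp
      rw [hlen]
      exact PySem.Int.floordiv_natCast n.toList.length P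
    rw [repeats_eq_countP n hl, hcnt, hB]
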